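-- pv_equiv track=rewrite | github.com/budlime/PathBox | src/matching.py | get_lcs_completion_or_none
-- ===== SOURCE A (Python) =====
-- from typing import List, Tuple, Optional
--
-- def get_lcs_completion_or_none(filename: str, directory_listing: List[str]) -> Optional[str]:
--     """
--     If there is a unique way to complete the path
--     such that the LCS is the same as the query
--     string, return that (similar to the way Fish
--     shell works)
--     """
--     completion = None
--
--     for candidate in directory_listing:
--         if lcs(filename, candidate) == filename:
--             if completion is not None:
--                 return None
--             else:
--                 completion = candidate
--
--     return completion
--
-- def lcs(A: str, B: str):
--     """
--     Taken and adapted from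
--     http://rosettacode.org/wiki/Longest_common_subsequence#Dynamic_Programming_7
--     """
--     lengths = [[0 for _ in range(len(B) + 1)] for _ in range(len(A) + 1)]
--
--     for i, x in enumerate(A):
--         for j, y in enumerate(B):
--             if x == y:
--                 lengths[i + 1][j + 1] = lengths[i][j] + 1
--             else:
--                 lengths[i + 1][j + 1] = max(lengths[i + 1][j], lengths[i][j + 1])
--
--     result = ""
--     x, y = len(A), len(B)
--     while x != 0 and y != 0:
--         if lengths[x][y] == lengths[x - 1][y]:
--             x -= 1
--         elif lengths[x][y] == lengths[x][y - 1]: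
--             y -= 1
--         else:
--             result = A[x - 1] + result
--             x -= 1
--             y -= 1
--     return result
-- ===== SOURCE B (Python) =====
-- from typing import List, Optional
--
-- def _is_subsequence(needle: str, haystack: str) -> bool:
--     it = iter(haystack)
--     return all(ch in it for ch in needle)
--
-- def get_lcs_completion_or_none(filename: str, directory_listing: List[str]) -> Optional[str]:
--     # lcs(filename, candidate) == filename  iff  filename is a subsequence of
--     # candidate, so a linear two-pointer scan replaces the O(m*n) DP per candidate.
--     matches = [c for c in directory_listing if _is_subsequence(filename, c)]
--     return matches[0] if len(matches) == 1 else None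
-- ===== Notes on version B (the rewrite author's own statement) =====
-- stated objective: faster
-- what changed: Replaces the per-candidate O(m*n) LCS dynamic-programming table and backtrack with a linear two-pointer subsequence test (lcs(f,c)==f iff f is a subsequence of c), and the early-return accumulator loop with a filter-then-singleton check.
import Mathlib
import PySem

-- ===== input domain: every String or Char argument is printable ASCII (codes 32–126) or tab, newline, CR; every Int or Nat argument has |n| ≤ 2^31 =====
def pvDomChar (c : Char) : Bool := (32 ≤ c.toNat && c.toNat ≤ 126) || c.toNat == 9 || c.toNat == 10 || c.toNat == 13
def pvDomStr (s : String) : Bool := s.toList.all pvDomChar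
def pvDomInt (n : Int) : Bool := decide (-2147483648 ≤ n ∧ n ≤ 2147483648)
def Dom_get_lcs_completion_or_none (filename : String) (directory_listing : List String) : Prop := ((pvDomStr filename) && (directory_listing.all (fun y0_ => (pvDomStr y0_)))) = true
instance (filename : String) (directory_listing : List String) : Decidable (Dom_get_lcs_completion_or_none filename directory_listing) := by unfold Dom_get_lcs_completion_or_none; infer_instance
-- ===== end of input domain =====

-- B replaces the per-candidate LCS dynamic programming by a linear two-pointer
-- subsequence test (lcs(f,c) == f iff f is a subsequence of c): objective = faster.

-- ===== PORT A =====
-- `lengths[i][j]` of A's DP table: the Python loop fills each cell by exactly this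
-- recurrence (borders stay 0); we port the table cell-wise by that recurrence.
def pvA_len (A B : List Char) : Nat → Nat → Nat
  | 0, _ => 0
  | _+1, 0 => 0
  | i+1, j+1 =>
    if A.getD i ' ' = B.getD j ' ' then pvA_len A B i j + 1
    else max (pvA_len A B (i+1) j) (pvA_len A B i (j+1))
termination_by i j => i + j

-- A's backtracking `while x != 0 and y != 0` loop, prepending to `result` (= res).
def pvA_back (A B : List Char) : Nat → Nat → List Char → List Char
  | 0, _, res => res
  | _+1, 0, res => res
  | x+1, y+1, res =>
    if pvA_len A B (x+1) (y+1) = pvA_len A B x (y+1) then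
      pvA_back A B x (y+1) res
    else if pvA_len A B (x+1) (y+1) = pvA_len A B (x+1) y then
      pvA_back A B (x+1) y res
    else
      pvA_back A B x y (A.getD x ' ' :: res)
termination_by x y => x + y

def pvA_lcs (A B : String) : String :=
  String.ofList (pvA_back A.toList B.toList A.toList.length B.toList.length [])

-- A's accumulator loop over the listing, with the early `return None` on a second hit.
def pvA_go (filename : String) : List String → Option String → Option String
  | [], completion => completion
  | c :: rest, completion =>
    if pvA_lcs filename c = filename then
      match completion with
      | some _ => none
      | none => pvA_go filename rest (some c)
    else pvA_go filename rest completion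

def get_lcs_completion_or_none (filename : String) (directory_listing : List String) : Option String :=
  pvA_go filename directory_listing none

-- ===== PORT B =====
-- two-pointer scan: advance in the candidate, consume a needle char on match
def pvB_isSubseq : List Char → List Char → Bool
  | [], _ => true
  | _ :: _, [] => false
  | x :: xs, y :: ys => if x = y then pvB_isSubseq xs ys else pvB_isSubseq (x :: xs) ys

def get_lcs_completion_or_none_alt (filename : String) (directory_listing : List String) : Option String :=
  match directory_listing.filter (fun c => pvB_isSubseq filename.toList c.toList) with
  | [m] => some m
  | _ => none

-- ===== PRECONDITION & SPEC =====
def Spec_get_lcs_completion_or_none (filename : String) (directory_listing : List String) (out : Option String) : Prop := out = get_lcs_completion_or_none_alt filename directory_listing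
instance (filename : String) (directory_listing : List String) (out : Option String) : Decidable (Spec_get_lcs_completion_or_none filename directory_listing out) := by unfold Spec_get_lcs_completion_or_none; infer_instance

-- ===== CLAIM (what is proved, stated in full; the proofs are below) =====
def Claim_equal_get_lcs_completion_or_none : Prop := ∀ (filename : String) (directory_listing : List String), Dom_get_lcs_completion_or_none filename directory_listing → Spec_get_lcs_completion_or_none filename directory_listing (get_lcs_completion_or_none filename directory_listing)

-- ===== LEMMAS AND PROOFS =====

-- unfold helpers for the DP table
theorem pvA_len_zero_left (A B : List Char) (j : Nat) : pvA_len A B 0 j = 0 := by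
  rw [pvA_len]

theorem pvA_len_zero_right (A B : List Char) (i : Nat) : pvA_len A B i 0 = 0 := by
  cases i <;> rw [pvA_len]

theorem pvA_len_succ (A B : List Char) (i j : Nat) :
    pvA_len A B (i+1) (j+1) =
      if A.getD i ' ' = B.getD j ' ' then pvA_len A B i j + 1
      else max (pvA_len A B (i+1) j) (pvA_len A B i (j+1)) := by
  rw [pvA_len]

-- monotonicity and the +1 step bound of the DP table, by strong induction on i+j
theorem pvA_len_facts (A B : List Char) : ∀ (n i j : Nat), i + j ≤ n →
    (pvA_len A B i j ≤ pvA_len A B i (j+1) ∧ pvA_len A B i j ≤ pvA_len A B (i+1) j ∧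
     pvA_len A B (i+1) j ≤ pvA_len A B i j + 1 ∧ pvA_len A B i (j+1) ≤ pvA_len A B i j + 1) := by
  intro n
  induction n with
  | zero =>
    intro i j h
    have hi : i = 0 := by omega
    have hj : j = 0 := by omega
    subst hi; subst hj
    simp [pvA_len_zero_left, pvA_len_zero_right]
  | succ n ih =>
    intro i j h
    refine ⟨?_, ?_, ?_, ?_⟩
    · -- pvA_len i j ≤ pvA_len i (j+1)
      match i, j with
      | 0, j => simp [pvA_len_zero_left]
      | i+1, 0 => simp [pvA_len_zero_right]
      | i+1, j+1 =>
        rw [pvA_len_succ A B i (j+1)]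
        by_cases hc : A.getD i ' ' = B.getD (j+1) ' '
        · rw [if_pos hc]
          exact (ih i (j+1) (by omega)).2.2.1
        · rw [if_neg hc]
          exact le_max_left _ _
    · -- pvA_len i j ≤ pvA_len (i+1) j
      match i, j with
      | 0, j => simp [pvA_len_zero_left]
      | i+1, 0 => simp [pvA_len_zero_right]
      | i+1, j+1 =>
        rw [pvA_len_succ A B (i+1) j]
        by_cases hc : A.getD (i+1) ' ' = B.getD j ' '
        · rw [if_pos hc]
          exact (ih (i+1) j (by omega)).2.2.2
        · rw [if_neg hc]
          exact le_max_right _ _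
    · -- pvA_len (i+1) j ≤ pvA_len i j + 1
      match j with
      | 0 => simp [pvA_len_zero_right]
      | j+1 =>
        rw [pvA_len_succ A B i j]
        by_cases hc : A.getD i ' ' = B.getD j ' '
        · rw [if_pos hc]
          have := (ih i j (by omega)).1
          omega
        · rw [if_neg hc]
          have h1 := (ih i j (by omega)).2.2.1
          have h2 := (ih i j (by omega)).1
          exact max_le (by omega) (by omega)
    · -- pvA_len i (j+1) ≤ pvA_len i j + 1
      match i with
      | 0 => simp [pvA_len_zero_left]
      | i+1 =>
        rw [pvA_len_succ A B i j]
        by_cases hc : A.getD i ' ' = B.getD j ' '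
        · rw [if_pos hc]
          have := (ih i j (by omega)).2.1
          omega
        · rw [if_neg hc]
          have h1 := (ih i j (by omega)).2.2.2
          have h2 := (ih i j (by omega)).2.1
          exact max_le (by omega) (by omega)

-- if neither the up nor the left neighbour equals the cell, the chars match and the cell is diag+1
theorem pvA_len_diag (A B : List Char) (i j : Nat)
    (h1 : pvA_len A B (i+1) (j+1) ≠ pvA_len A B i (j+1))
    (h2 : pvA_len A B (i+1) (j+1) ≠ pvA_len A B (i+1) j) :
    A.getD i ' ' = B.getD j ' ' ∧ pvA_len A B (i+1) (j+1) = pvA_len A B i j + 1 := by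
  by_cases hc : A.getD i ' ' = B.getD j ' '
  · exact ⟨hc, by rw [pvA_len_succ, if_pos hc]⟩
  · exfalso
    rw [pvA_len_succ, if_neg hc] at h1 h2
    rcases max_choice (pvA_len A B (i+1) j) (pvA_len A B i (j+1)) with h | h
    · exact h2 h
    · exact h1 h

theorem pvA_back_acc (A B : List Char) : ∀ (n x y : Nat) (res : List Char), x + y ≤ n →
    pvA_back A B x y res = pvA_back A B x y [] ++ res := by
  intro n
  induction n with
  | zero =>
    intro x y res h
    have hx : x = 0 := by omega
    subst hx
    rw [pvA_back, pvA_back]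
    simp
  | succ n ih =>
    intro x y res h
    match x, y with
    | 0, y => rw [pvA_back, pvA_back]; simp
    | x+1, 0 => rw [pvA_back, pvA_back]; simp
    | x+1, y+1 =>
      rw [pvA_back, pvA_back]
      split_ifs with h1 h2
      · exact ih x (y+1) res (by omega)
      · exact ih (x+1) y res (by omega)
      · rw [ih x y (A.getD x ' ' :: res) (by omega), ih x y [A.getD x ' '] (by omega)]
        simp

-- stripping an equal last character from a sublist
theorem pv_sublist_snoc_strip (l m : List Char) (a : Char)
    (h : List.Sublist (l ++ [a]) (m ++ [a])) : List.Sublist l m := by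
  have h' := h.reverse
  simp only [List.reverse_append, List.reverse_singleton, List.singleton_append] at h'
  have := List.cons_sublist_cons.mp h'
  have := this.reverse
  simpa using this

-- a sublist ending in a char different from the target's last char avoids that last char
theorem pv_sublist_snoc_ne (l m : List Char) (a b : Char) (hab : a ≠ b)
    (h : List.Sublist (l ++ [a]) (m ++ [b])) : List.Sublist (l ++ [a]) m := by
  have h' := h.reverse
  simp only [List.reverse_append, List.reverse_singleton, List.singleton_append] at h'
  cases h' with
  | cons _ h'' =>
    have := h''.reverse
    simpa using this
  | cons₂ => exact absurd rfl hab

-- the collected result is a common subsequence of the prefixes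
theorem pvA_back_sub (A B : List Char) : ∀ (n x y : Nat), x + y ≤ n → x ≤ A.length → y ≤ B.length →
    List.Sublist (pvA_back A B x y []) (A.take x) ∧ List.Sublist (pvA_back A B x y []) (B.take y) := by
  intro n
  induction n with
  | zero =>
    intro x y h _ _
    have hx : x = 0 := by omega
    subst hx
    rw [pvA_back]
    exact ⟨List.nil_sublist _, List.nil_sublist _⟩
  | succ n ih =>
    intro x y h hx hy
    match x, y with
    | 0, y => rw [pvA_back]; exact ⟨List.nil_sublist _, List.nil_sublist _⟩
    | x+1, 0 => rw [pvA_back]; exact ⟨List.nil_sublist _, List.nil_sublist _⟩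
    | x+1, y+1 =>
      have hxl : x < A.length := by omega
      have hyl : y < B.length := by omega
      rw [pvA_back]
      split_ifs with h1 h2
      · obtain ⟨sA, sB⟩ := ih x (y+1) (by omega) (by omega) hy
        exact ⟨sA.trans (List.take_sublist_take_left (by omega)), sB⟩
      · obtain ⟨sA, sB⟩ := ih (x+1) y (by omega) hx (by omega)
        exact ⟨sA, sB.trans (List.take_sublist_take_left (by omega))⟩
      · obtain ⟨hceq, _⟩ := pvA_len_diag A B x y h1 h2
        obtain ⟨sA, sB⟩ := ih x y (by omega) (by omega) (by omega)
        rw [pvA_back_acc A B (x + y) x y _ le_rfl]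
        constructor
        · rw [List.take_succ_eq_append_getElem hxl]
          have : A.getD x ' ' = A[x] := List.getD_eq_getElem A ' ' hxl
          rw [this]
          exact sA.append (List.Sublist.refl _)
        · rw [List.take_succ_eq_append_getElem hyl]
          have : A.getD x ' ' = B[y] := by
            rw [hceq]; exact List.getD_eq_getElem B ' ' hyl
          rw [this]
          exact sB.append (List.Sublist.refl _)

-- the collected result is at least as long as the DP value
theorem pvA_back_len (A B : List Char) : ∀ (n x y : Nat), x + y ≤ n →
    pvA_len A B x y ≤ (pvA_back A B x y []).length := by
  intro n
  induction n with
  | zero =>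
    intro x y h
    have hx : x = 0 := by omega
    subst hx
    simp [pvA_len_zero_left]
  | succ n ih =>
    intro x y h
    match x, y with
    | 0, y => simp [pvA_len_zero_left]
    | x+1, 0 => simp [pvA_len_zero_right]
    | x+1, y+1 =>
      rw [pvA_back]
      split_ifs with h1 h2
      · rw [h1]; exact ih x (y+1) (by omega)
      · rw [h2]; exact ih (x+1) y (by omega)
      · obtain ⟨_, hdiag⟩ := pvA_len_diag A B x y h1 h2
        rw [pvA_back_acc A B (x + y) x y _ le_rfl]
        have := ih x y (by omega)
        simp only [List.length_append, List.length_cons, List.length_nil]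
        omega

-- a common subsequence of the prefixes bounds the DP value from below
theorem pvA_len_ge (A B : List Char) : ∀ (n i j : Nat), i + j ≤ n → i ≤ A.length → j ≤ B.length →
    List.Sublist (A.take i) (B.take j) → i ≤ pvA_len A B i j := by
  intro n
  induction n with
  | zero =>
    intro i j h _ _ _
    have hi0 : i = 0 := by omega
    subst hi0
    exact Nat.zero_le _
  | succ n ih =>
    intro i j h hi hj hsub
    match i, j with
    | 0, j => exact Nat.zero_le _
    | i+1, 0 =>
      exfalso
      rw [List.take_zero] at hsub
      have := List.sublist_nil.mp hsub
      have hlen := congrArg List.length this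
      rw [List.length_take] at hlen
      simp only [List.length_nil] at hlen
      omega
    | i+1, j+1 =>
      have hxl : i < A.length := by omega
      have hyl : j < B.length := by omega
      rw [List.take_succ_eq_append_getElem hxl, List.take_succ_eq_append_getElem hyl] at hsub
      by_cases hc : A[i] = B[j]
      · rw [hc] at hsub
        have hsub' := pv_sublist_snoc_strip _ _ _ hsub
        have hih := ih i j (by omega) (by omega) (by omega) hsub'
        have hcell : pvA_len A B (i+1) (j+1) = pvA_len A B i j + 1 := by
          rw [pvA_len_succ, if_pos]
          rw [List.getD_eq_getElem A ' ' hxl, List.getD_eq_getElem B ' ' hyl]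
          exact hc
        omega
      · have hsub' := pv_sublist_snoc_ne _ _ _ _ hc hsub
        rw [← List.take_succ_eq_append_getElem hxl] at hsub'
        have hih := ih (i+1) j (by omega) hi (by omega) hsub'
        have hmono := (pvA_len_facts A B (i+1+j) (i+1) j le_rfl).1
        omega

theorem pvA_lcs_eq_iff (A B : List Char) :
    pvA_back A B A.length B.length [] = A ↔ List.Sublist A B := by
  constructor
  · intro h
    have := (pvA_back_sub A B (A.length + B.length) A.length B.length le_rfl le_rfl le_rfl).2
    rwa [h, List.take_length] at this
  · intro h
    have hsub := (pvA_back_sub A B (A.length + B.length) A.length B.length le_rfl le_rfl le_rfl).1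
    rw [List.take_length] at hsub
    have hge : A.length ≤ pvA_len A B A.length B.length :=
      pvA_len_ge A B (A.length + B.length) A.length B.length le_rfl le_rfl le_rfl
        (by rw [List.take_length, List.take_length]; exact h)
    exact hsub.eq_of_length_le
      (le_trans hge (pvA_back_len A B (A.length + B.length) A.length B.length le_rfl))

theorem pvB_isSubseq_iff : ∀ (m l : List Char), pvB_isSubseq l m = true ↔ List.Sublist l m := by
  intro m
  induction m with
  | nil => intro l; cases l <;> simp [pvB_isSubseq]
  | cons y ys ih =>
    intro l
    cases l with
    | nil => simp [pvB_isSubseq, List.nil_sublist]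
    | cons x xs =>
      by_cases hxy : x = y
      · subst hxy
        rw [show pvB_isSubseq (x :: xs) (x :: ys) = pvB_isSubseq xs ys from by
          rw [pvB_isSubseq, if_pos rfl]]
        rw [ih xs, List.cons_sublist_cons]
      · rw [show pvB_isSubseq (x :: xs) (y :: ys) = pvB_isSubseq (x :: xs) ys from by
          rw [pvB_isSubseq, if_neg hxy]]
        rw [ih (x :: xs)]
        constructor
        · exact fun h => h.cons y
        · intro h
          cases h with
          | cons _ h => exact h
          | cons₂ => exact absurd rfl hxy

theorem pv_pred_iff (f c : String) : pvA_lcs f c = f ↔ pvB_isSubseq f.toList c.toList = true := by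
  rw [pvB_isSubseq_iff, ← pvA_lcs_eq_iff]
  unfold pvA_lcs
  constructor
  · intro h
    have := congrArg String.toList h
    rwa [String.toList_ofList] at this
  · intro h
    rw [h]
    exact String.toList_inj.mp (by rw [String.toList_ofList])

theorem pvA_go_some (f : String) : ∀ (l : List String) (a : String),
    pvA_go f l (some a) =
      (match l.filter (fun c => pvB_isSubseq f.toList c.toList) with
       | [] => some a
       | _ :: _ => none) := by
  intro l
  induction l with
  | nil => intro a; rfl
  | cons c rest ih =>
    intro a
    rw [pvA_go, List.filter_cons]
    by_cases h : pvA_lcs f c = f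
    · have hb : pvB_isSubseq f.toList c.toList = true := (pv_pred_iff f c).mp h
      simp [h, hb]
    · have hb : pvB_isSubseq f.toList c.toList ≠ true := fun hh => h ((pv_pred_iff f c).mpr hh)
      simp [h, hb, ih a]

theorem pvA_go_none (f : String) : ∀ (l : List String),
    pvA_go f l none =
      (match l.filter (fun c => pvB_isSubseq f.toList c.toList) with
       | [m] => some m
       | _ => none) := by
  intro l
  induction l with
  | nil => rfl
  | cons c rest ih =>
    rw [pvA_go, List.filter_cons]
    by_cases h : pvA_lcs f c = f
    · have hb : pvB_isSubseq f.toList c.toList = true := (pv_pred_iff f c).mp h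
      rw [if_pos h, if_pos hb, pvA_go_some f rest c]
      cases hrest : rest.filter (fun c => pvB_isSubseq f.toList c.toList) <;> simp
    · have hb : pvB_isSubseq f.toList c.toList ≠ true := fun hh => h ((pv_pred_iff f c).mpr hh)
      rw [if_neg h, if_neg hb, ih]

-- ===== VERDICT (by name: the statement is the Claim_ definition above) =====
theorem get_lcs_completion_or_none_spec : Claim_equal_get_lcs_completion_or_none := by
  intro filename directory_listing _
  unfold Spec_get_lcs_completion_or_none get_lcs_completion_or_none get_lcs_completion_or_none_alt
  exact pvA_go_none filename directory_listing
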